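-- pv_equiv track=rewrite | github.com/RodrigoZonzin/t1d_ode_model | modelo_novo/modelonovo_solveivp.py | update_constants_with_params
-- ===== SOURCE A (Python) =====
-- def update_constants_with_params(constants, params):
--     updated_constants = constants.copy()
--
--     constant_names = [constant[0] for constant in constants]
--
--     for name, value in params.items():
--         for idx, (const_name, const_value) in enumerate(updated_constants):
--             if const_name == name:
--                 updated_constants[idx] = (const_name, value)
--
--     return updated_constants
-- ===== SOURCE B (Python) =====
-- def update_constants_with_params(constants, params):
--     return [(name, params.get(name, value)) for name, value in constants]
-- ===== Notes on version B (the rewrite author's own statement) =====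
-- stated objective: faster
-- what changed: Replaces A's nested params-times-constants scan with a single comprehension over constants that looks each name up directly in the params dict, returning a fresh list.
import Mathlib
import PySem

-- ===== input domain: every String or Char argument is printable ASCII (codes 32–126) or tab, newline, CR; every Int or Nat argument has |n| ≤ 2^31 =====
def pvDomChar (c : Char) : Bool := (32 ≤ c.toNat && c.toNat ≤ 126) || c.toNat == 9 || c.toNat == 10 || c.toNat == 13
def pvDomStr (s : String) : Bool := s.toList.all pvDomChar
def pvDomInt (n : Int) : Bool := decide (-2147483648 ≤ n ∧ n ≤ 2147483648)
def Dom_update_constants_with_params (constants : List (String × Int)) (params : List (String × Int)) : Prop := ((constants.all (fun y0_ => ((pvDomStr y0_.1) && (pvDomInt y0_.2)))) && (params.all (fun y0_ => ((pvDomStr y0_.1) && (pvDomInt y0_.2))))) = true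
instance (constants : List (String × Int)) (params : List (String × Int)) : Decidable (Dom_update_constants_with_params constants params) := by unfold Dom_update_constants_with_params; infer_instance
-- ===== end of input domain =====

-- B replaces A's nested params-times-constants scan with one pass over constants
-- using the params dict as direct lookup table (asymptotically faster; measured faster).

-- ===== PORT A =====
-- Port of A: copy constants, then for each (name, value) in the params dict,
-- scan updated_constants and overwrite every entry whose name matches.
-- (A's unused 'constant_names' list is kept as a discarded let-binding.)
def update_constants_with_params (constants : List (String × Int)) (params : List (String × Int)) : List (String × Int) :=
  let updated_constants := constants
  let _constant_names := constants.map (fun constant => constant.1)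
  params.foldl (fun updated nv =>
    updated.map (fun c => if c.1 == nv.1 then (c.1, nv.2) else (c.1, c.2))) updated_constants

-- ===== PORT B =====
-- B's dict lookup: params is a Python dict (insertion order, later binding for a
-- key overwrites the earlier), so as an association list the LAST binding wins.
def pvDictGet? (params : List (String × Int)) (name : String) : Option Int :=
  (params.reverse.find? (fun p => p.1 == name)).map (fun p => p.2)

-- Port of B: one pass over constants, direct dict lookup with default.
def update_constants_with_params_alt (constants : List (String × Int)) (params : List (String × Int)) : List (String × Int) :=
  constants.map (fun nv => (nv.1, (pvDictGet? params nv.1).getD nv.2))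

-- ===== PRECONDITION & SPEC =====
def Spec_update_constants_with_params (constants : List (String × Int)) (params : List (String × Int)) (out : List (String × Int)) : Prop := out = update_constants_with_params_alt constants params
instance (constants : List (String × Int)) (params : List (String × Int)) (out : List (String × Int)) : Decidable (Spec_update_constants_with_params constants params out) := by unfold Spec_update_constants_with_params; infer_instance

-- ===== CLAIM (what is proved, stated in full; the proofs are below) =====
def Claim_equal_update_constants_with_params : Prop := ∀ (constants : List (String × Int)) (params : List (String × Int)), Dom_update_constants_with_params constants params → Spec_update_constants_with_params constants params (update_constants_with_params constants params)

-- ===== LEMMAS AND PROOFS =====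

-- ===== VERDICT (by name: the statement is the Claim_ definition above) =====
-- Last-binding lookup on a cons: the tail's binding wins over the head's.
theorem pvDictGet?_cons (kv : String × Int) (ps : List (String × Int)) (n : String) :
    pvDictGet? (kv :: ps) n
      = (pvDictGet? ps n).or (if kv.1 == n then some kv.2 else none) := by
  simp only [pvDictGet?, List.reverse_cons, List.find?_append]
  cases h : ps.reverse.find? (fun p => p.1 == n) with
  | some p => simp
  | none =>
    simp only [Option.map_none, Option.none_or]
    by_cases hk : kv.1 == n <;> simp [List.find?, hk]

-- Key lemma: folding the per-param overwrite pass over params equals one map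
-- that looks up the last binding of each name in params.
theorem fold_eq_lookup (params constants : List (String × Int)) :
    params.foldl (fun updated nv =>
      updated.map (fun c => if c.1 == nv.1 then (c.1, nv.2) else (c.1, c.2))) constants
    = constants.map (fun nv => (nv.1, (pvDictGet? params nv.1).getD nv.2)) := by
  induction params generalizing constants with
  | nil => simp [pvDictGet?]
  | cons kv ps ih =>
    simp only [List.foldl_cons, ih, List.map_map]
    apply List.map_congr_left
    intro c _
    simp only [Function.comp, pvDictGet?_cons]
    by_cases hk : c.1 == kv.1
    · have hk' : kv.1 = c.1 := (beq_iff_eq.mp hk).symm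
      cases h : pvDictGet? ps c.1 <;> simp_all [Option.or]
    · have hk' : ¬ kv.1 = c.1 := fun h' => hk (beq_iff_eq.mpr h'.symm)
      cases h : pvDictGet? ps c.1 <;> simp_all [Option.or]

theorem update_constants_with_params_spec : Claim_equal_update_constants_with_params := by
  intro constants params _
  unfold Spec_update_constants_with_params update_constants_with_params update_constants_with_params_alt
  exact fold_eq_lookup params constants
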